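-- pv_equiv track=rewrite | github.com/Was404/metod_prog_6sem | BLOCK-2/D.py | restore_tournament_table
-- ===== SOURCE A (Python) =====
-- def restore_tournament_table(K, points):
--     table = [[0] * K for _ in range(K)]
--
--     # Заполнение верхнего треугольника таблицы
--     for i in range(K - 1):
--         for j in range(i + 1, K):
--             if points[i] < points[j]:
--                 table[i][j] = 2
--             elif points[i] == points[j]:
--                 table[i][j] = 1
--
--     # Заполнение нижнего треугольника таблицы
--     for i in range(1, K):
--         for j in range(i):
--             table[i][j] = 2 - table[j][i]
--
--     return table
-- ===== SOURCE B (Python) =====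
-- def restore_tournament_table(K, points):
--     return [[0 if i == j
--              else 2 if points[i] < points[j]
--              else 1 if points[i] == points[j]
--              else 0
--              for j in range(K)]
--             for i in range(K)]
-- ===== Notes on version B (the rewrite author's own statement) =====
-- stated objective: simpler
-- what changed: Replaces the two triangle-filling passes over a mutable table (the second of which reads back the upper triangle) with a single comprehension that computes every cell directly from the points comparison, with an explicit 0 on the diagonal; no cell ever reads the table.
import Mathlib
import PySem

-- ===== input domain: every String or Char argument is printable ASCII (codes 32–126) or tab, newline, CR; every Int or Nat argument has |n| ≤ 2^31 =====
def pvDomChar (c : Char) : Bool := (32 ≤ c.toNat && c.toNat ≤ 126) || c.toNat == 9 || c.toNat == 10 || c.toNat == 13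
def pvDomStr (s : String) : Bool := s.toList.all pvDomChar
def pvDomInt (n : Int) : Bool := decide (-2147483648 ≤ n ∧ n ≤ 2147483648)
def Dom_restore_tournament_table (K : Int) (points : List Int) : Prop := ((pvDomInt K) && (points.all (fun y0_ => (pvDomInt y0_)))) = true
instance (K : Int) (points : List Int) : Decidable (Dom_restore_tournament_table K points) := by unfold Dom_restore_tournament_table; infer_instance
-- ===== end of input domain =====

-- B replaces A's two triangle-filling passes over a mutable table with one comprehension
-- computing each cell directly from the points comparison (objective: simpler).

-- ===== PORT A =====
def restore_tournament_table (K : Int) (points : List Int) : List (List Int) :=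
  let table0 := (PySem.List.pyRange 0 K 1).map (fun _ => List.replicate K.toNat (0 : Int))
  -- upper triangle
  let t1 := (PySem.List.pyRange 0 (K - 1) 1).foldl (fun t i =>
    (PySem.List.pyRange (i + 1) K 1).foldl (fun t j =>
      if PySem.List.pyGetD points i 0 < PySem.List.pyGetD points j 0 then
        PySem.List.pySetD t i (PySem.List.pySetD (PySem.List.pyGetD t i []) j 2)
      else if PySem.List.pyGetD points i 0 = PySem.List.pyGetD points j 0 then
        PySem.List.pySetD t i (PySem.List.pySetD (PySem.List.pyGetD t i []) j 1)
      else t) t) table0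
  -- lower triangle
  (PySem.List.pyRange 1 K 1).foldl (fun t i =>
    (PySem.List.pyRange 0 i 1).foldl (fun t j =>
      PySem.List.pySetD t i (PySem.List.pySetD (PySem.List.pyGetD t i [])
        j (2 - PySem.List.pyGetD (PySem.List.pyGetD t j []) i 0))) t) t1

-- ===== PORT B =====
def restore_tournament_table_alt (K : Int) (points : List Int) : List (List Int) :=
  (PySem.List.pyRange 0 K 1).map (fun i =>
    (PySem.List.pyRange 0 K 1).map (fun j =>
      if i = j then 0
      else if PySem.List.pyGetD points i 0 < PySem.List.pyGetD points j 0 then 2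
      else if PySem.List.pyGetD points i 0 = PySem.List.pyGetD points j 0 then 1
      else 0))

-- ===== PRECONDITION & SPEC =====
-- Pre_ excludes exactly the inputs where the Python (both A and B) raises IndexError:
-- K ≥ 2 with fewer than K entries in points.
def Pre_restore_tournament_table (K : Int) (points : List Int) : Prop :=
  2 ≤ K → K ≤ (points.length : Int)
instance (K : Int) (points : List Int) : Decidable (Pre_restore_tournament_table K points) := by
  unfold Pre_restore_tournament_table; infer_instance

def pvWitness_restore_tournament_table : Int × List Int := (3, [5, 3, 5])

def Spec_restore_tournament_table (K : Int) (points : List Int) (out : List (List Int)) : Prop := out = restore_tournament_table_alt K points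
instance (K : Int) (points : List Int) (out : List (List Int)) : Decidable (Spec_restore_tournament_table K points out) := by unfold Spec_restore_tournament_table; infer_instance

-- ===== CLAIM (what is proved, stated in full; the proofs are below) =====
def Claim_equal_restore_tournament_table : Prop := ∀ (K : Int) (points : List Int), Dom_restore_tournament_table K points → Pre_restore_tournament_table K points → Spec_restore_tournament_table K points (restore_tournament_table K points)

-- ===== LEMMAS AND PROOFS =====

-- points[k] at a Nat index (total form used by both ports)
def pvP (points : List Int) (k : Nat) : Int := PySem.List.pyGetD points (k : Int) 0
-- the upper-triangle value A writes at (a,b), a < b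
def pvU (points : List Int) (a b : Nat) : Int :=
  if pvP points a < pvP points b then 2 else if pvP points a = pvP points b then 1 else 0
-- cell read (table[a][b] with default 0)
def pvView (t : List (List Int)) (a b : Nat) : Int := (t.getD a []).getD b 0
-- cell write (table[a][b] = v)
def pvUpd (t : List (List Int)) (i j : Nat) (v : Int) : List (List Int) :=
  t.set i ((t.getD i []).set j v)
-- shape invariant: n rows of length n
def pvShape (n : Nat) (t : List (List Int)) : Prop :=
  t.length = n ∧ ∀ r ∈ t, r.length = n

theorem pvShape_upd {n : Nat} {t : List (List Int)} (ht : pvShape n t) (i j : Nat) (v : Int)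
    (hi : i < n) : pvShape n (pvUpd t i j v) := by
  obtain ⟨hlen, hrow⟩ := ht
  refine ⟨by simp [pvUpd, hlen], ?_⟩
  intro r hr
  rcases List.mem_or_eq_of_mem_set hr with h | h
  · exact hrow r h
  · subst h
    rw [List.length_set]
    have hi' : i < t.length := by omega
    have : t.getD i [] = t[i] := by
      simp [List.getD_eq_getElem?_getD, List.getElem?_eq_getElem hi']
    rw [this]
    exact hrow _ (List.getElem_mem hi')

theorem pvGetDset_eq {α : Type} (l : List α) (i : Nat) (x : α) (d : α) (h : i < l.length) :
    (l.set i x).getD i d = x := by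
  rw [List.getD_eq_getElem?_getD, List.getElem?_set_self h, Option.getD_some]

theorem pvGetDset_ne {α : Type} (l : List α) {i a : Nat} (x : α) (d : α) (h : i ≠ a) :
    (l.set i x).getD a d = l.getD a d := by
  rw [List.getD_eq_getElem?_getD, List.getElem?_set_ne h, List.getD_eq_getElem?_getD]

theorem pvView_upd {n : Nat} {t : List (List Int)} (ht : pvShape n t) (i j : Nat) (v : Int)
    (hi : i < n) (hj : j < n) (a b : Nat) :
    pvView (pvUpd t i j v) a b = if a = i ∧ b = j then v else pvView t a b := by
  obtain ⟨hlen, hrow⟩ := ht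
  have hi' : i < t.length := by omega
  have hgi : t.getD i [] = t[i] := by
    simp [List.getD_eq_getElem?_getD, List.getElem?_eq_getElem hi']
  have hjlen : j < (t.getD i []).length := by
    rw [hgi]; rw [hrow _ (List.getElem_mem hi')]; omega
  unfold pvView pvUpd
  by_cases hai : a = i
  · subst hai
    rw [pvGetDset_eq _ _ _ _ hi']
    by_cases hbj : b = j
    · subst hbj; simp only [and_self, if_true]; exact pvGetDset_eq _ _ _ _ hjlen
    · simp only [hbj, and_false, if_false]
      exact pvGetDset_ne _ _ _ (fun h => hbj h.symm)
  · simp only [hai, false_and, if_false]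
    rw [pvGetDset_ne _ _ _ (fun h => hai h.symm)]

-- A's pass-1 loop body at row i, column j
def pvStep1 (points : List Int) (i : Nat) (t : List (List Int)) (j : Nat) : List (List Int) :=
  if pvP points i < pvP points j then pvUpd t i j 2
  else if pvP points i = pvP points j then pvUpd t i j 1
  else t

-- Nat-indexed model of A's whole computation (for K = n ≥ 0)
def pvModelA (n : Nat) (points : List Int) : List (List Int) :=
  let t0 := List.replicate n (List.replicate n (0 : Int))
  let t1 := (List.range (n - 1)).foldl (fun t i =>
    (List.range (n - (i + 1))).foldl (fun t m => pvStep1 points i t (i + 1 + m)) t) t0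
  (List.range (n - 1)).foldl (fun t k =>
    (List.range (k + 1)).foldl (fun t m => pvUpd t (k + 1) m (2 - pvView t m (k + 1))) t) t1

theorem pvView_step1 {n : Nat} {t : List (List Int)} (ht : pvShape n t) (points : List Int)
    (i j : Nat) (hi : i < n) (hj : j < n) (a b : Nat) :
    pvView (pvStep1 points i t j) a b =
      if a = i ∧ b = j ∧ pvU points i j ≠ 0 then pvU points i j else pvView t a b := by
  unfold pvStep1
  by_cases h1 : pvP points i < pvP points j
  · have hU : pvU points i j = 2 := by unfold pvU; rw [if_pos h1]
    rw [if_pos h1, pvView_upd ht _ _ _ hi hj, hU]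
    norm_num
  · rw [if_neg h1]
    by_cases h2 : pvP points i = pvP points j
    · have hU : pvU points i j = 1 := by unfold pvU; rw [if_neg h1, if_pos h2]
      rw [if_pos h2, pvView_upd ht _ _ _ hi hj, hU]
      norm_num
    · have hU : pvU points i j = 0 := by unfold pvU; rw [if_neg h1, if_neg h2]
      rw [if_neg h2, hU]
      simp

theorem pvPass1_inner (points : List Int) (n i : Nat) (hi : i < n) :
    ∀ (c : Nat), i + 1 + c ≤ n → ∀ t, pvShape n t →
      pvShape n ((List.range c).foldl (fun t m => pvStep1 points i t (i + 1 + m)) t) ∧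
      ∀ a b, pvView ((List.range c).foldl (fun t m => pvStep1 points i t (i + 1 + m)) t) a b =
        if a = i ∧ i + 1 ≤ b ∧ b < i + 1 + c ∧ pvU points i b ≠ 0 then pvU points i b
        else pvView t a b := by
  intro c
  induction c with
  | zero =>
    intro _ t ht
    refine ⟨ht, ?_⟩
    intro a b
    rw [if_neg (by rintro ⟨_, h1, h2, _⟩; omega)]
    rfl
  | succ c ih =>
    intro hc t ht
    obtain ⟨ihS, ihV⟩ := ih (by omega) t ht
    rw [List.range_succ, List.foldl_append]
    set R := (List.range c).foldl (fun t m => pvStep1 points i t (i + 1 + m)) t with hR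
    simp only [List.foldl_cons, List.foldl_nil]
    have hj : i + 1 + c < n := by omega
    refine ⟨by unfold pvStep1; split_ifs <;>
      first | exact pvShape_upd ihS _ _ _ hi | exact ihS, ?_⟩
    intro a b
    rw [pvView_step1 ihS points i (i + 1 + c) hi hj, ihV]
    by_cases hab : a = i ∧ b = i + 1 + c
    · obtain ⟨ha, hb⟩ := hab
      by_cases hU : pvU points i b ≠ 0
      · rw [if_pos ⟨ha, hb, by rw [← hb]; exact hU⟩, ← hb,
          if_pos ⟨ha, by omega, by omega, hU⟩]
      · rw [if_neg (by rintro ⟨_, _, h⟩; exact hU (by rw [hb]; exact h)),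
          if_neg (by rintro ⟨_, _, h3, _⟩; omega),
          if_neg (by rintro ⟨_, _, _, h⟩; exact hU h)]
    · rw [if_neg (by rintro ⟨h1, h2, _⟩; exact hab ⟨h1, h2⟩)]
      by_cases hcond : a = i ∧ i + 1 ≤ b ∧ b < i + 1 + c ∧ pvU points i b ≠ 0
      · rw [if_pos hcond, if_pos ⟨hcond.1, hcond.2.1, by omega, hcond.2.2.2⟩]
      · rw [if_neg hcond, if_neg]
        rintro ⟨h1, h2, h3, h4⟩
        exact hcond ⟨h1, h2, by
          rcases Nat.lt_succ_iff_lt_or_eq.mp h3 with h | h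
          · exact h
          · exact absurd ⟨h1, h⟩ hab, h4⟩

theorem pvPass1_outer (points : List Int) (n : Nat) :
    ∀ (co : Nat), co ≤ n → ∀ t, pvShape n t → (∀ a b, pvView t a b = 0) →
      pvShape n ((List.range co).foldl (fun t i =>
        (List.range (n - (i + 1))).foldl (fun t m => pvStep1 points i t (i + 1 + m)) t) t) ∧
      ∀ a b, pvView ((List.range co).foldl (fun t i =>
        (List.range (n - (i + 1))).foldl (fun t m => pvStep1 points i t (i + 1 + m)) t) t) a b =
        if a < co ∧ a < b ∧ b < n ∧ pvU points a b ≠ 0 then pvU points a b else 0 := by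
  intro co
  induction co with
  | zero =>
    intro _ t ht h0
    refine ⟨ht, ?_⟩
    intro a b
    simp [h0 a b]
  | succ co ih =>
    intro hc t ht h0
    obtain ⟨ihS, ihV⟩ := ih (by omega) t ht h0
    rw [List.range_succ, List.foldl_append]
    set R := (List.range co).foldl (fun t i =>
      (List.range (n - (i + 1))).foldl (fun t m => pvStep1 points i t (i + 1 + m)) t) t with hR
    simp only [List.foldl_cons, List.foldl_nil]
    have hco : co < n := by omega
    obtain ⟨S1, V1⟩ := pvPass1_inner points n co hco (n - (co + 1)) (by omega) R ihS
    refine ⟨S1, ?_⟩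
    intro a b
    rw [V1, ihV]
    by_cases ha : a = co
    · subst ha
      by_cases hb : a + 1 ≤ b ∧ b < a + 1 + (n - (a + 1)) ∧ pvU points a b ≠ 0
      · rw [if_pos ⟨rfl, hb⟩, if_pos ⟨by omega, by omega, by omega, hb.2.2⟩]
      · rw [if_neg (by rintro ⟨_, h⟩; exact hb h), if_neg (by rintro ⟨h1, h2, h3, h4⟩; omega),
          if_neg (by rintro ⟨h1, h2, h3, h4⟩; exact hb ⟨by omega, by omega, h4⟩)]
    · rw [if_neg (by rintro ⟨h, _⟩; exact ha h)]
      by_cases hcond : a < co ∧ a < b ∧ b < n ∧ pvU points a b ≠ 0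
      · rw [if_pos hcond, if_pos ⟨by omega, hcond.2⟩]
      · rw [if_neg hcond, if_neg (by rintro ⟨h1, h2, h3, h4⟩; exact hcond ⟨by omega, h2, h3, h4⟩)]

theorem pvPass2_inner (n i : Nat) (hi : i < n) :
    ∀ (c : Nat), c ≤ i → ∀ t, pvShape n t →
      pvShape n ((List.range c).foldl (fun t m => pvUpd t i m (2 - pvView t m i)) t) ∧
      ∀ a b, pvView ((List.range c).foldl (fun t m => pvUpd t i m (2 - pvView t m i)) t) a b =
        if a = i ∧ b < c then 2 - pvView t b i else pvView t a b := by
  intro c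
  induction c with
  | zero =>
    intro _ t ht
    refine ⟨ht, ?_⟩
    intro a b
    simp
  | succ c ih =>
    intro hc t ht
    obtain ⟨ihS, ihV⟩ := ih (by omega) t ht
    rw [List.range_succ, List.foldl_append]
    set R := (List.range c).foldl (fun t m => pvUpd t i m (2 - pvView t m i)) t with hR
    simp only [List.foldl_cons, List.foldl_nil]
    have hcn : c < n := by omega
    have hread : pvView R c i = pvView t c i := by
      rw [ihV, if_neg (by rintro ⟨h, _⟩; omega)]
    refine ⟨pvShape_upd ihS _ _ _ hi, ?_⟩
    intro a b
    rw [pvView_upd ihS _ _ _ hi hcn, hread, ihV]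
    by_cases hab : a = i ∧ b = c
    · rw [if_pos hab, if_pos ⟨hab.1, by omega⟩, hab.2]
    · rw [if_neg hab]
      by_cases hcond : a = i ∧ b < c
      · rw [if_pos hcond, if_pos ⟨hcond.1, by omega⟩]
      · rw [if_neg hcond, if_neg (by rintro ⟨h1, h2⟩; exact hcond ⟨h1, by
          rcases Nat.lt_succ_iff_lt_or_eq.mp h2 with h | h
          · exact h
          · exact absurd ⟨h1, h⟩ hab⟩)]

theorem pvPass2_outer (n : Nat) :
    ∀ (co : Nat), co + 1 ≤ n → ∀ t, pvShape n t →
      pvShape n ((List.range co).foldl (fun t k =>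
        (List.range (k + 1)).foldl (fun t m => pvUpd t (k + 1) m (2 - pvView t m (k + 1))) t) t) ∧
      ∀ a b, pvView ((List.range co).foldl (fun t k =>
        (List.range (k + 1)).foldl (fun t m => pvUpd t (k + 1) m (2 - pvView t m (k + 1))) t) t) a b =
        if b < a ∧ a ≤ co then 2 - pvView t b a else pvView t a b := by
  intro co
  induction co with
  | zero =>
    intro _ t ht
    refine ⟨ht, ?_⟩
    intro a b
    rw [if_neg (by rintro ⟨h1, h2⟩; omega)]
    rfl
  | succ co ih =>
    intro hc t ht
    obtain ⟨ihS, ihV⟩ := ih (by omega) t ht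
    rw [List.range_succ, List.foldl_append]
    set R := (List.range co).foldl (fun t k =>
      (List.range (k + 1)).foldl (fun t m => pvUpd t (k + 1) m (2 - pvView t m (k + 1))) t) t with hR
    simp only [List.foldl_cons, List.foldl_nil]
    have hin : co + 1 < n := by omega
    obtain ⟨S1, V1⟩ := pvPass2_inner n (co + 1) hin (co + 1) (le_refl _) R ihS
    refine ⟨S1, ?_⟩
    intro a b
    rw [V1]
    by_cases ha : a = co + 1
    · subst ha
      by_cases hb : b < co + 1
      · rw [if_pos ⟨rfl, hb⟩, ihV, if_neg (by rintro ⟨h1, h2⟩; omega),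
          if_pos ⟨hb, le_refl _⟩]
      · rw [if_neg (by rintro ⟨_, h⟩; exact hb h), ihV,
          if_neg (by rintro ⟨h1, h2⟩; omega), if_neg (by rintro ⟨h1, h2⟩; exact hb h1)]
    · rw [if_neg (by rintro ⟨h, _⟩; exact ha h), ihV]
      by_cases hcond : b < a ∧ a ≤ co
      · rw [if_pos hcond, if_pos ⟨hcond.1, by omega⟩]
      · rw [if_neg hcond, if_neg (by rintro ⟨h1, h2⟩; exact hcond ⟨h1, by omega⟩)]

theorem pvView_eq_getElem {t : List (List Int)}
    {a b : Nat} (ha' : a < t.length) (hb' : b < t[a].length) :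
    pvView t a b = t[a][b] := by
  unfold pvView
  rw [List.getD_eq_getElem _ _ ha', List.getD_eq_getElem _ _ hb']

theorem pvExt (n : Nat) (t : List (List Int)) (f : Nat → Nat → Int) (h1 : pvShape n t)
    (h2 : ∀ a b, a < n → b < n → pvView t a b = f a b) :
    t = (List.range n).map (fun a => (List.range n).map (fun b => f a b)) := by
  obtain ⟨hlen, hrow⟩ := h1
  apply List.ext_getElem
  · simp [hlen]
  · intro a ha ha'
    have han : a < n := by omega
    have hrowa : t[a].length = n := hrow _ (List.getElem_mem ha)
    simp only [List.getElem_map, List.getElem_range]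
    apply List.ext_getElem
    · simp [hrowa]
    · intro b hb hb'
      have hbn : b < n := by omega
      simp only [List.getElem_map, List.getElem_range]
      rw [← pvView_eq_getElem ha hb]
      exact h2 a b han hbn

theorem pvModelA_eq (n : Nat) (points : List Int) :
    pvModelA n points = (List.range n).map (fun a => (List.range n).map (fun b =>
      if a = b then 0 else pvU points a b)) := by
  rcases n with _ | m
  · simp [pvModelA]
  set n := m + 1 with hn
  unfold pvModelA
  have hS0 : pvShape n (List.replicate n (List.replicate n (0 : Int))) := by
    refine ⟨by simp, ?_⟩
    intro r hr
    rw [List.eq_of_mem_replicate hr]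
    simp
  have hV0 : ∀ a b, pvView (List.replicate n (List.replicate n (0 : Int))) a b = 0 := by
    intro a b
    unfold pvView
    by_cases ha : a < n
    · rw [List.getD_replicate _ ha]
      by_cases hb : b < n
      · rw [List.getD_replicate _ hb]
      · simp [List.getD_eq_getElem?_getD, hb]
    · simp [List.getD_eq_getElem?_getD, ha]
  obtain ⟨S1, V1⟩ := pvPass1_outer points n (n - 1) (by omega) _ hS0 hV0
  obtain ⟨S2, V2⟩ := pvPass2_outer n (n - 1) (by omega) _ S1
  apply pvExt n _ _ S2
  intro a b ha hb
  rw [V2]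
  by_cases hba : b < a
  · rw [if_pos ⟨hba, by omega⟩, V1]
    have hane : ¬ (a = b) := by omega
    by_cases hU : pvU points b a = 0
    · rw [if_neg (by rintro ⟨_, _, _, h⟩; exact h hU), if_neg hane]
      unfold pvU at hU ⊢
      split_ifs at hU ⊢ <;> omega
    · rw [if_pos ⟨by omega, hba, ha, hU⟩, if_neg hane]
      unfold pvU at hU ⊢
      split_ifs at hU ⊢ <;> omega
  · rw [if_neg (by rintro ⟨h, _⟩; exact hba h), V1]
    by_cases hab : a < b
    · have hane : ¬ (a = b) := by omega
      by_cases hU : pvU points a b = 0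
      · rw [if_neg (by rintro ⟨_, _, _, h⟩; exact h hU), if_neg hane]
        exact hU.symm
      · rw [if_pos ⟨by omega, hab, hb, hU⟩, if_neg hane]
    · rw [if_neg (by rintro ⟨_, h, _⟩; omega), if_pos (by omega)]

theorem pvPortA_eq (n : Nat) (points : List Int) :
    restore_tournament_table (n : Int) points = pvModelA n points := by
  simp only [restore_tournament_table, pvModelA, PySem.List.pyRange_one, List.foldl_map,
    List.map_map, Function.comp_def, List.map_const', List.length_range, Int.toNat_natCast,
    zero_add]
  rw [show ((n : Int) - 0).toNat = n from by omega,
    show ((n : Int) - 1 - 0).toNat = n - 1 from by omega,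
    show ((n : Int) - 1).toNat = n - 1 from by omega]
  congr 1
  · -- pass-2 outer bodies
    funext t k
    rw [show ((1 : Int) + (k : Int) - 0).toNat = k + 1 from by omega]
    congr 1
    funext t' m
    have e1 : (1 : Int) + (k : Int) = ((k + 1 : Nat) : Int) := by push_cast; ring
    rw [e1]
    unfold pvUpd pvView
    simp only [PySem.List.pyGetD_natCast, PySem.List.pySetD_natCast]
  · -- pass-1 result
    congr 1
    funext t k
    rw [show ((n : Int) - ((k : Int) + 1)).toNat = n - (k + 1) from by omega]
    congr 1
    funext t' m
    have e1 : (k : Int) + 1 + (m : Int) = ((k + 1 + m : Nat) : Int) := by push_cast; ring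
    rw [e1]
    unfold pvStep1 pvUpd pvP
    simp only [PySem.List.pyGetD_natCast, PySem.List.pySetD_natCast]

theorem pvPortB_eq (n : Nat) (points : List Int) :
    restore_tournament_table_alt (n : Int) points = (List.range n).map (fun a =>
      (List.range n).map (fun b => if a = b then 0 else pvU points a b)) := by
  unfold restore_tournament_table_alt
  simp only [PySem.List.pyRange_one, List.map_map]
  have e0 : (((n : Int) - 0).toNat) = n := by omega
  rw [e0]
  apply List.map_congr_left
  intro a _
  apply List.map_congr_left
  intro b _
  simp only [Function.comp_apply, zero_add]
  unfold pvU pvP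
  by_cases hab : a = b
  · rw [if_pos (by exact_mod_cast hab), if_pos hab]
  · rw [if_neg (by exact_mod_cast hab), if_neg hab]

theorem restore_tournament_table_spec : Claim_equal_restore_tournament_table := by
  intro K points _ _
  unfold Spec_restore_tournament_table
  by_cases hK : K ≤ 0
  · have h1 : PySem.List.pyRange 0 K 1 = [] := PySem.List.pyRange_one_eq_nil (by omega)
    have h2 : PySem.List.pyRange 0 (K - 1) 1 = [] := PySem.List.pyRange_one_eq_nil (by omega)
    have h3 : PySem.List.pyRange 1 K 1 = [] := PySem.List.pyRange_one_eq_nil (by omega)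
    unfold restore_tournament_table restore_tournament_table_alt
    rw [h1, h2, h3]
    simp
  · have hK' : K = ((K.toNat : Nat) : Int) := by omega
    rw [hK', pvPortA_eq, pvPortB_eq, pvModelA_eq]
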